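-- pv_equiv track=rewrite | github.com/10XGenomics/cellranger | tenkit/lib/python/tenkit/bed_utils.py | interval_subtract
-- ===== SOURCE A (Python) =====
-- def interval_subtract(start, end, overlappings):
--     final = []
--     cur_start = start
--
--     for ss, ee in overlappings:
--         if ss > cur_start:
--             final.append((cur_start, ss))
--         cur_start = ee
--
--     if cur_start < end:
--         final.append((cur_start,end))
--
--     return final
-- ===== SOURCE B (Python) =====
-- def interval_subtract(start, end, overlappings):
--     ov = list(overlappings)
--     left = [start] + [ee for ss, ee in ov]
--     right = [ss for ss, ee in ov] + [end]
--     return [(s, e) for s, e in zip(left, right) if s < e]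
-- ===== Notes on version B (the rewrite author's own statement) =====
-- stated objective: simpler
-- what changed: Replaces the running cur_start state machine with two aligned boundary lists (previous ends vs next starts) zipped and filtered by s < e.
import Mathlib
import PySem

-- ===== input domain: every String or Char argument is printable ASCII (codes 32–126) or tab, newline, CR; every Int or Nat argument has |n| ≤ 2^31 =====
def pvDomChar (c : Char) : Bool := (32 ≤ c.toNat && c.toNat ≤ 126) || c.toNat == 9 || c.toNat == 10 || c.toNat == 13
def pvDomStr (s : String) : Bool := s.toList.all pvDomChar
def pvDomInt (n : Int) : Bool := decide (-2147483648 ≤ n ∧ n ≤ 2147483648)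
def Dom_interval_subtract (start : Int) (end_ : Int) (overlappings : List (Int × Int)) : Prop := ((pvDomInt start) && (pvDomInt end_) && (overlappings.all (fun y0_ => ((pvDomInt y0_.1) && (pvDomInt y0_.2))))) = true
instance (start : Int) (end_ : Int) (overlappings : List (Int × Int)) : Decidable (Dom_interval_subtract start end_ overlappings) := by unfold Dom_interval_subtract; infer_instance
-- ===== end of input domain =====

-- B replaces A's running cur_start state with two aligned boundary lists zipped and filtered (objective: simpler).


-- ===== PORT A =====
-- loop over overlappings carrying (final, cur_start); append (cur_start, ss) when ss > cur_start, then cur_start := ee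
def interval_subtract (start : Int) (end_ : Int) (overlappings : List (Int × Int)) : List (Int × Int) :=
  let st := overlappings.foldl
    (fun (acc : List (Int × Int) × Int) p =>
      (if p.1 > acc.2 then acc.1 ++ [(acc.2, p.1)] else acc.1, p.2))
    ([], start)
  if st.2 < end_ then st.1 ++ [(st.2, end_)] else st.1

-- ===== PORT B =====
-- left = [start] + ends, right = starts + [end]; zip and keep pairs with s < e
def interval_subtract_alt (start : Int) (end_ : Int) (overlappings : List (Int × Int)) : List (Int × Int) :=
  let left := start :: overlappings.map Prod.snd
  let right := overlappings.map Prod.fst ++ [end_]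
  (left.zip right).filter (fun p => p.1 < p.2)

-- ===== PRECONDITION & SPEC =====
def Spec_interval_subtract (start : Int) (end_ : Int) (overlappings : List (Int × Int)) (out : List (Int × Int)) : Prop := out = interval_subtract_alt start end_ overlappings
instance (start : Int) (end_ : Int) (overlappings : List (Int × Int)) (out : List (Int × Int)) : Decidable (Spec_interval_subtract start end_ overlappings out) := by unfold Spec_interval_subtract; infer_instance

-- ===== CLAIM (what is proved, stated in full; the proofs are below) =====
def Claim_equal_interval_subtract : Prop := ∀ (start : Int) (end_ : Int) (overlappings : List (Int × Int)), Dom_interval_subtract start end_ overlappings → Spec_interval_subtract start end_ overlappings (interval_subtract start end_ overlappings)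

-- ===== LEMMAS AND PROOFS =====

-- A's fold accumulator distributes over a pre-filled prefix
theorem pv_foldA_append (ov : List (Int × Int)) (l : List (Int × Int)) (c : Int) :
    ov.foldl (fun (acc : List (Int × Int) × Int) p =>
      (if p.1 > acc.2 then acc.1 ++ [(acc.2, p.1)] else acc.1, p.2)) (l, c)
    = (l ++ (ov.foldl (fun (acc : List (Int × Int) × Int) p =>
        (if p.1 > acc.2 then acc.1 ++ [(acc.2, p.1)] else acc.1, p.2)) ([], c)).1,
       (ov.foldl (fun (acc : List (Int × Int) × Int) p =>
        (if p.1 > acc.2 then acc.1 ++ [(acc.2, p.1)] else acc.1, p.2)) ([], c)).2) := by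
  induction ov generalizing l c with
  | nil => simp
  | cons p rest ih =>
    simp only [List.foldl_cons]
    rw [ih, ih (if p.1 > c then [] ++ [(c, p.1)] else []) p.2]
    split_ifs <;> simp

theorem pv_eq (start end_ : Int) (ov : List (Int × Int)) :
    interval_subtract start end_ ov = interval_subtract_alt start end_ ov := by
  induction ov generalizing start with
  | nil =>
    by_cases h : start < end_ <;>
      simp [interval_subtract, interval_subtract_alt, List.filter_cons, h]
  | cons p rest ih =>
    have h := ih p.2
    simp only [interval_subtract, interval_subtract_alt] at h ⊢
    simp only [List.foldl_cons, List.map_cons, List.zip_cons_cons, List.filter_cons,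
      List.cons_append]
    rw [pv_foldA_append]
    by_cases hc : start < p.1 <;>
      simp only [gt_iff_lt, hc, decide_true, decide_false, if_true, if_false, List.nil_append] <;>
      split_ifs at h ⊢ <;> simp_all

-- ===== VERDICT (by name: the statement is the Claim_ definition above) =====
theorem interval_subtract_spec : Claim_equal_interval_subtract := by
  intro start end_ ov _
  unfold Spec_interval_subtract
  exact pv_eq start end_ ov
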